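-- pv_equiv track=rewrite | github.com/NeevBPatel/RADAR-CHALLENGE-2025 | Main_Project/helpers.py | find_groups_of_consecutive_false
-- ===== SOURCE A (Python) =====
-- def find_groups_of_consecutive_false(bool_array):
--     """
--     Identifies and counts groups of consecutive 'False' elements in a list of booleans.
--     A group is defined as a sequence of one or more 'False' values at
--     consecutive indices.
--
--     Args:
--         bool_array (list): A list of boolean values (True/False).
--
--     Returns:
--         tuple: A tuple containing:
--             - int: The total number of groups of consecutive 'False' elements.
--             - list: A nested list where each sublist contains the start and
--                     end indices of such a group.
--     """
--
--     groups = []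
--     in_false_group = False
--     start_index = None
--
--     # Iterate through the array with index
--     for i, value in enumerate(bool_array):
--         # Case 1: Start of a new group of 'False' elements
--         if not value and not in_false_group:
--             in_false_group = True
--             start_index = i
--         # Case 2: End of a group of 'False' elements (when a True is found)
--         elif value and in_false_group:
--             end_index = i - 1
--             groups.append([start_index, end_index])
--             in_false_group = False
--             start_index = None # Reset for clarity
--
--     # Edge case: If the array ends while inside a 'False' group
--     if in_false_group:
--         end_index = len(bool_array) - 1
--         groups.append([start_index, end_index])
--
--     # The number of groups is the length of our list of groups
--     num_groups = len(groups)
--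
--     return num_groups, groups
-- ===== SOURCE B (Python) =====
-- from itertools import groupby
--
--
-- def find_groups_of_consecutive_false(bool_array):
--     groups = []
--     for key, grp in groupby(enumerate(bool_array), key=lambda iv: not iv[1]):
--         if key:
--             g = list(grp)
--             groups.append([g[0][0], g[-1][0]])
--     return len(groups), groups
-- ===== Notes on version B (the rewrite author's own statement) =====
-- stated objective: idiomatic
-- what changed: Replaces the in_false_group/start_index flag state machine (with its trailing end-of-array edge case) by itertools.groupby over enumerate: each falsy run is materialized as one group and its first/last indices are read off directly.
import Mathlib
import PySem

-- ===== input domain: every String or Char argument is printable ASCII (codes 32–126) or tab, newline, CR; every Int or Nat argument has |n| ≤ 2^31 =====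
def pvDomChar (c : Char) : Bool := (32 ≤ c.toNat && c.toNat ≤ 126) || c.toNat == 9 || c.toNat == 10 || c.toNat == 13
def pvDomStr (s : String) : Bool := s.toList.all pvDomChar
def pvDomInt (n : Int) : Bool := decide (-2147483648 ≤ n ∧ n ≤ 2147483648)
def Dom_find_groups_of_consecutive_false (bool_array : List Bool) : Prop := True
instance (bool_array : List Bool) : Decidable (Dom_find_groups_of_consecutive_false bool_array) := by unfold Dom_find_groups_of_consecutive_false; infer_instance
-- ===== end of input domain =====

-- B replaces A's in_false_group/start_index flag state machine by a groupby-style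
-- partition of enumerate(bool_array) into runs (objective: more idiomatic; not faster).

-- ===== PORT A =====
-- Python's enumerate, with an explicit starting index (int indices)
def pvEnumFrom (i : Int) : List Bool → List (Int × Bool)
  | [] => []
  | b :: ys => (i, b) :: pvEnumFrom (i + 1) ys

-- one iteration of A's for-loop; state = (groups, in_false_group, start_index)
def pvStepA (st : List (List Int) × Bool × Option Int) (p : Int × Bool) :
    List (List Int) × Bool × Option Int :=
  if !p.2 && !st.2.1 then (st.1, true, some p.1)
  else if p.2 && st.2.1 then (st.1 ++ [[st.2.2.getD 0, p.1 - 1]], false, none)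
  else st

def find_groups_of_consecutive_false (bool_array : List Bool) : Int × List (List Int) :=
  let st := (pvEnumFrom 0 bool_array).foldl pvStepA ([], false, none)
  -- edge case: the array ends while inside a 'False' group
  let groups := if st.2.1 then st.1 ++ [[st.2.2.getD 0, (bool_array.length : Int) - 1]] else st.1
  ((groups.length : Int), groups)

-- ===== PORT B =====
-- hand port of itertools.groupby on key = not value: split off the run of the
-- current key, then recurse on the remainder
def pvTakeRun (k : Bool) : List (Int × Bool) → List (Int × Bool) × List (Int × Bool)
  | [] => ([], [])
  | x :: xs => if (!x.2) == k then
      let p := pvTakeRun k xs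
      (x :: p.1, p.2)
    else ([], x :: xs)

theorem pvTakeRun_rest_len (k : Bool) (xs : List (Int × Bool)) :
    (pvTakeRun k xs).2.length ≤ xs.length := by
  induction xs with
  | nil => simp [pvTakeRun]
  | cons x xs ih =>
      simp only [pvTakeRun]
      split
      · simpa using Nat.le_succ_of_le ih
      · simp

def pvRuns : List (Int × Bool) → List (List (Int × Bool))
  | [] => []
  | x :: xs =>
    let p := pvTakeRun (!x.2) xs
    (x :: p.1) :: pvRuns p.2
  termination_by l => l.length
  decreasing_by
    simpa using Nat.lt_succ_of_le (pvTakeRun_rest_len (!x.2) xs)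

def find_groups_of_consecutive_false_alt (bool_array : List Bool) : Int × List (List Int) :=
  let groups := (pvRuns (pvEnumFrom 0 bool_array)).filterMap (fun g =>
    match g with
    | [] => none
    | a :: r => if !a.2 then some [a.1, (List.getLastD r a).1] else none)
  ((groups.length : Int), groups)

-- ===== PRECONDITION & SPEC =====
def Spec_find_groups_of_consecutive_false (bool_array : List Bool) (out : Int × List (List Int)) : Prop := out = find_groups_of_consecutive_false_alt bool_array
instance (bool_array : List Bool) (out : Int × List (List Int)) : Decidable (Spec_find_groups_of_consecutive_false bool_array out) := by unfold Spec_find_groups_of_consecutive_false; infer_instance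

-- ===== CLAIM (what is proved, stated in full; the proofs are below) =====
def Claim_equal_find_groups_of_consecutive_false : Prop := ∀ (bool_array : List Bool), Dom_find_groups_of_consecutive_false bool_array → Spec_find_groups_of_consecutive_false bool_array (find_groups_of_consecutive_false bool_array)

-- ===== LEMMAS AND PROOFS =====

-- groups produced by B from an enumerated list
def pvGOf (l : List (Int × Bool)) : List (List Int) :=
  (pvRuns l).filterMap (fun g =>
    match g with
    | [] => none
    | a :: r => if !a.2 then some [a.1, (List.getLastD r a).1] else none)

-- groups A still produces from inside a False-run that started at s, scanning from index i
def pvCont (s : Int) : Int → List Bool → List (List Int)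
  | i, [] => [[s, i - 1]]
  | i, true :: ys => [s, i - 1] :: pvGOf (pvEnumFrom (i + 1) ys)
  | i, false :: ys => pvCont s (i + 1) ys

-- A's finalization, with the overall last index e
def pvFin (e : Int) (st : List (List Int) × Bool × Option Int) : List (List Int) :=
  if st.2.1 then st.1 ++ [[st.2.2.getD 0, e]] else st.1

theorem pvGOf_nil : pvGOf [] = [] := by simp [pvGOf, pvRuns]

theorem pvGOf_cons_true (i : Int) (l : List (Int × Bool)) :
    pvGOf ((i, true) :: l) = pvGOf l := by
  match l with
  | [] => simp [pvGOf, pvRuns, pvTakeRun]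
  | (j, true) :: l' => simp [pvGOf, pvRuns, pvTakeRun]
  | (j, false) :: l' => simp [pvGOf, pvRuns, pvTakeRun]

theorem pvRun_cont (ys : List Bool) : ∀ (i s : Int),
    [s, (List.getLastD (pvTakeRun true (pvEnumFrom i ys)).1 (i - 1, false)).1]
        :: pvGOf (pvTakeRun true (pvEnumFrom i ys)).2
      = pvCont s i ys := by
  induction ys with
  | nil => intro i s; simp [pvEnumFrom, pvTakeRun, pvCont, pvGOf_nil]
  | cons b ys ih =>
      intro i s
      cases b with
      | true => simp [pvEnumFrom, pvTakeRun, pvCont, pvGOf_cons_true]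
      | false =>
          simp only [pvEnumFrom, pvTakeRun, Bool.not_false, beq_self_eq_true, if_true,
            List.getLastD_cons, pvCont]
          simpa using ih (i + 1) s

theorem pvGOf_cons_false (i : Int) (ys : List Bool) :
    pvGOf ((i, false) :: pvEnumFrom (i + 1) ys) = pvCont i (i + 1) ys := by
  have h := pvRun_cont ys (i + 1) i
  rw [pvGOf, pvRuns]
  simp only [Bool.not_false, List.filterMap_cons, if_true]
  have : (i + 1 - 1 : Int) = i := by omega
  rw [this] at h
  simpa [pvGOf] using h

theorem pvMain (ys : List Bool) :
    (∀ (i : Int) (gs : List (List Int)),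
      pvFin (i + (ys.length : Int) - 1)
        ((pvEnumFrom i ys).foldl pvStepA (gs, false, none)) = gs ++ pvGOf (pvEnumFrom i ys))
  ∧ (∀ (i s : Int) (gs : List (List Int)),
      pvFin (i + (ys.length : Int) - 1)
        ((pvEnumFrom i ys).foldl pvStepA (gs, true, some s)) = gs ++ pvCont s i ys) := by
  induction ys with
  | nil =>
      constructor
      · intro i gs; simp [pvEnumFrom, pvFin, pvGOf_nil]
      · intro i s gs; simp [pvEnumFrom, pvFin, pvCont]
  | cons b ys ih =>
      obtain ⟨ih1, ih2⟩ := ih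
      have hlen : ∀ i : Int, i + ((b :: ys).length : Int) - 1 = (i + 1) + (ys.length : Int) - 1 := by
        intro i; simp; omega
      constructor
      · intro i gs
        cases b with
        | true =>
            simp only [pvEnumFrom, List.foldl_cons, pvStepA, hlen i]
            norm_num
            rw [ih1 (i + 1) gs, pvGOf_cons_true]
        | false =>
            simp only [pvEnumFrom, List.foldl_cons, pvStepA, hlen i]
            norm_num
            rw [ih2 (i + 1) i gs, pvGOf_cons_false]
      · intro i s gs
        cases b with
        | true =>
            simp only [pvEnumFrom, List.foldl_cons, pvStepA, hlen i]
            norm_num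
            rw [ih1 (i + 1) (gs ++ [[s, i - 1]])]
            simp [pvCont, pvGOf_cons_true]
        | false =>
            simp only [pvEnumFrom, List.foldl_cons, pvStepA, hlen i]
            norm_num
            rw [ih2 (i + 1) s gs]
            simp [pvCont]

-- ===== VERDICT (by name: the statement is the Claim_ definition above) =====
theorem find_groups_of_consecutive_false_spec : Claim_equal_find_groups_of_consecutive_false := by
  intro xs _
  unfold Spec_find_groups_of_consecutive_false find_groups_of_consecutive_false
    find_groups_of_consecutive_false_alt
  have h := (pvMain xs).1 0 []
  simp only [zero_add, List.nil_append] at h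
  have hg : (if ((pvEnumFrom 0 xs).foldl pvStepA ([], false, none)).2.1 then
      ((pvEnumFrom 0 xs).foldl pvStepA ([], false, none)).1 ++
        [[((pvEnumFrom 0 xs).foldl pvStepA ([], false, none)).2.2.getD 0, (xs.length : Int) - 1]]
    else ((pvEnumFrom 0 xs).foldl pvStepA ([], false, none)).1) = pvGOf (pvEnumFrom 0 xs) := by
    simpa [pvFin] using h
  simp only [pvGOf] at hg
  simp [hg]
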